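-- pv_equiv track=rewrite | github.com/GALJO/pythonBasics | olympiad_exercises/not.py | counter_of_longest
-- ===== SOURCE A (Python) =====
-- def counter_of_longest(_tab):
--     _tab.append(-1)
--     _counter = 1
--     _res = {}
--     for _start in range(len(_tab) - 1):
--         _end = _start + 1
--         if _tab[_start] < _tab[_end]:
--             _counter += 1
--         else:
--             item = _res.get(_counter, 0)
--             _res.update({_counter: item + 1})
--             _counter = 1
--             continue
--     return _res
-- ===== SOURCE B (Python) =====
-- def counter_of_longest(_tab):
--     _tab.append(-1)
--     breaks = [-1] + [i for i, (a, b) in enumerate(zip(_tab, _tab[1:])) if not a < b]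
--     lengths = [b - a for a, b in zip(breaks, breaks[1:])]
--     res = {}
--     for n in lengths:
--         res[n] = res.get(n, 0) + 1
--     return res
-- ===== Notes on version B (the rewrite author's own statement) =====
-- stated objective: alternative
-- what changed: Replaces A's single-pass running-counter state machine over index pairs by a two-phase computation: collect the break positions of the (sentinel-extended) sequence, take successive differences of the sentinel-prefixed break list as the run lengths, and tally those lengths into the dict.
import Mathlib
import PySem

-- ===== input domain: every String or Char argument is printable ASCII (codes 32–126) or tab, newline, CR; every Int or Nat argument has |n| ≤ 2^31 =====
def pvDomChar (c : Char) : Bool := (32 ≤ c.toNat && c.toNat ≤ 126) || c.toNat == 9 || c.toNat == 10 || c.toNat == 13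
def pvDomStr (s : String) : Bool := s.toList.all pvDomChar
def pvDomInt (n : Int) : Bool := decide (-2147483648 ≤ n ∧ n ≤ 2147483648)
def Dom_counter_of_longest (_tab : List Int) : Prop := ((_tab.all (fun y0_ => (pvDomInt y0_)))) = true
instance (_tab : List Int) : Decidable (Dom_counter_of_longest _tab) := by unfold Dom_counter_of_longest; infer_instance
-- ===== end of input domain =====

-- B replaces A's running-counter state machine by a two-phase break-index/difference
-- computation (alternative decomposition, same cost). Both Pythons append the same
-- sentinel element to the caller's list in place; the equivalence proved here is about
-- the RETURN value (B performs the same mutation).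

-- ===== PORT A =====
-- indices _start and _start+1 are always in range of t, so pyGetD with default 0 is exact
def counter_of_longest (_tab : List Int) : List (Int × Int) :=
  let t := _tab ++ [-1]
  let r := (PySem.List.pyRange 0 ((t.length : Int) - 1) 1).foldl
    (fun s _start =>
      let _end := _start + 1
      if PySem.List.pyGetD t _start 0 < PySem.List.pyGetD t _end 0 then
        (s.1 + 1, s.2)
      else
        (1, s.2.insert s.1 (s.2.getD s.1 0 + 1)))
    ((1 : Int), (PySem.Dict.empty : PySem.Dict Int Int))
  r.2.items

-- ===== PORT B =====
def counter_of_longest_alt (_tab : List Int) : List (Int × Int) :=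
  let t := _tab ++ [-1]
  let breaks : List Int :=
    (-1) :: (((PySem.List.enumerate (t.zip (t.drop 1)) 0).filter
        (fun p => !decide (p.2.1 < p.2.2))).map (·.1))
  let lengths := (breaks.zip (breaks.drop 1)).map (fun p => p.2 - p.1)
  let res := lengths.foldl (fun d n => d.insert n (d.getD n 0 + 1))
      (PySem.Dict.empty : PySem.Dict Int Int)
  res.items

-- ===== PRECONDITION & SPEC =====
def Spec_counter_of_longest (_tab : List Int) (out : List (Int × Int)) : Prop := out = counter_of_longest_alt _tab
instance (_tab : List Int) (out : List (Int × Int)) : Decidable (Spec_counter_of_longest _tab out) := by unfold Spec_counter_of_longest; infer_instance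

-- ===== CLAIM (what is proved, stated in full; the proofs are below) =====
def Claim_equal_counter_of_longest : Prop := ∀ (_tab : List Int), Dom_counter_of_longest _tab → Spec_counter_of_longest _tab (counter_of_longest _tab)

-- ===== LEMMAS AND PROOFS =====

-- run lengths produced by A's state machine over the adjacent-pair list, starting counter c
def segs : List (Int × Int) → Int → List Int
  | [], _ => []
  | (a, b) :: ps, c => if a < b then segs ps (c + 1) else c :: segs ps 1

-- A's indexed loop over range(len t - 1) is the same fold over the adjacent-pair list
theorem fold_range_eq_fold_zip {S : Type} (t : List Int) (g : S → Int → Int → S) (s0 : S) :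
    (List.range (t.length - 1)).foldl (fun s j => g s (t.getD j 0) (t.getD (j + 1) 0)) s0
      = (t.zip (t.drop 1)).foldl (fun s p => g s p.1 p.2) s0 := by
  induction t generalizing s0 with
  | nil => simp
  | cons x t ih =>
    cases t with
    | nil => simp
    | cons y rest =>
      have hlen : (x :: y :: rest).length - 1 = ((y :: rest).length - 1) + 1 := by
        simp
      rw [hlen, List.range_succ_eq_map, List.foldl_cons, List.foldl_map]
      simpa using ih (s0 := g s0 x y)

-- A's loop body collects exactly (segs ps c) into the dict
theorem foldA_snd (ps : List (Int × Int)) (c : Int) (d : PySem.Dict Int Int) :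
    ((ps.foldl (fun s p => if p.1 < p.2 then (s.1 + 1, s.2)
        else ((1 : Int), s.2.insert s.1 (s.2.getD s.1 0 + 1))) (c, d)).2)
      = (segs ps c).foldl (fun d n => d.insert n (d.getD n 0 + 1)) d := by
  induction ps generalizing c d with
  | nil => simp [segs]
  | cons p ps ih =>
    by_cases h : p.1 < p.2 <;> simp [segs, h, ih]

-- successive differences of the break indices are A's run lengths
theorem diffs_breaks (ps : List (Int × Int)) (s x : Int) :
    (let ks := x :: (((PySem.List.enumerate ps s).filter
        (fun p => !decide (p.2.1 < p.2.2))).map (·.1));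
     (ks.zip (ks.drop 1)).map (fun p => p.2 - p.1)) = segs ps (s - x) := by
  induction ps generalizing s x with
  | nil => simp [PySem.List.enumerate_nil, segs]
  | cons p ps ih =>
    by_cases h : p.1 < p.2
    · have := ih (s + 1) x
      simp only [PySem.List.enumerate_cons, List.filter_cons, h, decide_true,
        Bool.not_true, segs] at this ⊢
      rw [show s + 1 - x = s - x + 1 by ring] at this
      exact this
    · have := ih (s + 1) s
      simp only [PySem.List.enumerate_cons, List.filter_cons, h, decide_false,
        Bool.not_false, if_true, List.map_cons, segs] at this ⊢
      rw [show s + 1 - s = (1 : Int) by ring] at this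
      simp only [List.zip_cons_cons, List.drop_succ_cons, List.drop_zero, List.map_cons] at this ⊢
      rw [this]
      simp

-- ===== VERDICT (by name: the statement is the Claim_ definition above) =====
theorem counter_of_longest_spec : Claim_equal_counter_of_longest := by
  intro _tab _
  simp only [Spec_counter_of_longest, counter_of_longest, counter_of_longest_alt]
  have hlen : (((_tab ++ [-1]).length : Int) - 1) = ((_tab ++ [-1]).length - 1 : Nat) := by
    simp
  rw [hlen, PySem.List.pyRange_zero_natCast, List.foldl_map]
  refine congrArg (fun d : PySem.Dict Int Int => d.items) ?_
  refine (congrArg Prod.snd (PySem.List.foldl_congr_mem _ _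
      (fun (s : Int × PySem.Dict Int Int) (j : Nat) =>
        if (_tab ++ [-1]).getD j 0 < (_tab ++ [-1]).getD (j + 1) 0 then (s.1 + 1, s.2)
        else ((1 : Int), s.2.insert s.1 (s.2.getD s.1 0 + 1))) _
      (by
        intro acc j _
        have hc : ((j : Int) + 1) = ((j + 1 : Nat) : Int) := by push_cast; ring
        simp only [hc, PySem.List.pyGetD_natCast]))).trans ?_
  refine (congrArg Prod.snd (fold_range_eq_fold_zip (_tab ++ [-1])
      (fun (s : Int × PySem.Dict Int Int) a b =>
        if a < b then (s.1 + 1, s.2) else ((1 : Int), s.2.insert s.1 (s.2.getD s.1 0 + 1)))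
      ((1 : Int), (PySem.Dict.empty : PySem.Dict Int Int)))).trans ?_
  refine (foldA_snd ((_tab ++ [-1]).zip ((_tab ++ [-1]).drop 1)) 1 PySem.Dict.empty).trans ?_
  have hd := diffs_breaks ((_tab ++ [-1]).zip ((_tab ++ [-1]).drop 1)) 0 (-1)
  rw [show (0 : Int) - (-1) = 1 by ring] at hd
  rw [hd]
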